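-- pv_equiv track=rewrite | github.com/quirk-finder/texgrep | indexer/preprocess.py | _compute_line_offsets
-- ===== SOURCE A (Python) =====
-- import difflib
-- from typing import List
--
-- def _compute_line_offsets(original: List[str], processed: List[str]) -> List[int]:
--     if not processed:
--         return []
--
--     matcher = difflib.SequenceMatcher(None, original, processed, autojunk=False)
--     offsets = [0] * len(processed)
--     for tag, i1, i2, j1, j2 in matcher.get_opcodes():
--         if tag == "equal":
--             for idx, orig_idx in enumerate(range(i1, i2), start=j1):
--                 offsets[idx] = orig_idx + 1
--         else:
--             fallback = min(i1 + 1, len(original)) if original else 1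
--             if fallback <= 0:
--                 fallback = 1
--             for idx in range(j1, j2):
--                 offsets[idx] = fallback
--
--     return offsets
-- ===== SOURCE B (Python) =====
-- from typing import List
--
-- def _compute_line_offsets(original: List[str], processed: List[str]) -> List[int]:
--     if not processed:
--         return []
--     n, m = len(original), len(processed)
--
--     # Longest common run of a region, by a dense DP row (run length ending at (i, j));
--     # strict improvement while scanning i then j ascending picks the earliest maximal run.
--     def longest(alo, ahi, blo, bhi):
--         bi, bj, bk = alo, blo, 0
--         run = [0] * (bhi - blo)           # run[j-blo] = run length ending at (i, j)
--         for i in range(alo, ahi):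
--             new = [0] * (bhi - blo)
--             for j in range(blo, bhi):
--                 if original[i] == processed[j]:
--                     k = (run[j - blo - 1] if j > blo else 0) + 1
--                     new[j - blo] = k
--                     if k > bk:
--                         bi, bj, bk = i - k + 1, j - k + 1, k
--             run = new
--         return bi, bj, bk
--
--     # Divide and conquer: emit the blocks of a region in ascending order directly.
--     def blocks(alo, ahi, blo, bhi):
--         i, j, k = longest(alo, ahi, blo, bhi)
--         if k == 0:
--             return []
--         return blocks(alo, i, blo, j) + [(i, j, k)] + blocks(i + k, ahi, j + k, bhi)
--
--     # Build the offsets list left to right by appending: a gap run, then an equal run, per block.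
--     out = []
--     prev_i = 0
--     for i, j, k in blocks(0, n, 0, m) + [(n, m, 0)]:
--         gap = min(prev_i + 1, n) if n else 1
--         out += [gap] * (j - len(out))
--         out += range(i + 1, i + k + 1)
--         prev_i = i + k
--     return out
-- ===== Notes on version B (the rewrite author's own statement) =====
-- stated objective: alternative
-- what changed: B replaces difflib's machinery (b2j index dict, explicit stack queue, tuple sort, adjacent-block merge and backward/forward extension loops) with a recursive divide-and-conquer that finds each region's longest common run by a dense DP row and emits blocks already in order, then builds the offsets list by appending gap/equal runs instead of index-assigning into a preallocated array driven by opcodes.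
import Mathlib
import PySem

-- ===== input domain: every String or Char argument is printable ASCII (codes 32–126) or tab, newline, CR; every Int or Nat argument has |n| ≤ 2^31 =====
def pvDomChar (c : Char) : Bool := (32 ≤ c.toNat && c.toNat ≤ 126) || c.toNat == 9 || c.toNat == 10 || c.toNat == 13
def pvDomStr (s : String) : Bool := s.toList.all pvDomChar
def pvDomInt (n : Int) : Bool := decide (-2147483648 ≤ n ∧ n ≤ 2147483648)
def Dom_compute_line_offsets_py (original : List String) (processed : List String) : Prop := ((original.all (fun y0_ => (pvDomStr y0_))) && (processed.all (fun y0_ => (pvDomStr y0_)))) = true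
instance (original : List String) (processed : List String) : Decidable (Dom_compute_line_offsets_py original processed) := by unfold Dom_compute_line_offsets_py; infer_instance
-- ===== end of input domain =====

-- B replaces difflib's machinery (b2j index dict, explicit stack, sort, adjacent-block merge,
-- extension loops) by a recursive divide-and-conquer with a dense DP row for the longest common
-- run, emitting blocks in order, and builds the offsets by appending; same asymptotic cost.

-- ===== PORT A =====

-- a matching block (i, j, size); all difflib indices are nonnegative, kept as Nat
abbrev PvBlock := Nat × Nat × Nat

-- difflib.__chain_b: b2j maps an element of b to the ascending list of its indices in b
def pvB2j (b : List String) : PySem.Dict String (List Nat) :=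
  (List.range b.length).foldl
    (fun d i => d.insert (b.getD i "") ((d.getD (b.getD i "") []) ++ [i])) PySem.Dict.empty

-- inner `for j in b2j.get(a[i], [])` loop of find_longest_match; state = (newj2len, besti, bestj, bestsize).
-- `j = 0` guard: Python's j2len.get(j-1, 0) looks up -1 (never a key) when j = 0.
def pvFlmInner (j2len : PySem.Dict Nat Nat) (blo bhi i : Nat) :
    List Nat → (PySem.Dict Nat Nat × Nat × Nat × Nat) → (PySem.Dict Nat Nat × Nat × Nat × Nat)
  | [], st => st
  | j :: rest, st =>
    if j < blo then pvFlmInner j2len blo bhi i rest st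
    else if bhi ≤ j then st  -- `break` (b2j lists are ascending)
    else
      let (nj, besti, bestj, bestsize) := st
      let k := (if j = 0 then 0 else j2len.getD (j - 1) 0) + 1
      let nj := nj.insert j k
      if bestsize < k then pvFlmInner j2len blo bhi i rest (nj, i + 1 - k, j + 1 - k, k)
      else pvFlmInner j2len blo bhi i rest (nj, besti, bestj, bestsize)

-- first extension while-loop (no junk, so the junk loops are no-ops)
def pvExtendBack (a b : List String) (alo blo : Nat) : Nat → Nat → Nat → Nat × Nat × Nat
  | besti, bestj, bestsize =>
    if h : alo < besti ∧ blo < bestj ∧ a.getD (besti - 1) "" = b.getD (bestj - 1) "" then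
      pvExtendBack a b alo blo (besti - 1) (bestj - 1) (bestsize + 1)
    else (besti, bestj, bestsize)
  termination_by besti _ _ => besti
  decreasing_by omega

-- second extension while-loop
def pvExtendFwd (a b : List String) (ahi bhi besti bestj : Nat) : Nat → Nat
  | bestsize =>
    if h : besti + bestsize < ahi ∧ bestj + bestsize < bhi ∧
        a.getD (besti + bestsize) "" = b.getD (bestj + bestsize) "" then
      pvExtendFwd a b ahi bhi besti bestj (bestsize + 1)
    else bestsize
  termination_by n => ahi - (besti + n)
  decreasing_by omega

def pvFindLongestMatch (a b : List String) (b2j : PySem.Dict String (List Nat))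
    (alo ahi blo bhi : Nat) : PvBlock :=
  let st := (List.range' alo (ahi - alo)).foldl
    (fun (st : PySem.Dict Nat Nat × Nat × Nat × Nat) i =>
      let (j2len, besti, bestj, bestsize) := st
      pvFlmInner j2len blo bhi i (b2j.getD (a.getD i "") []) (PySem.Dict.empty, besti, bestj, bestsize))
    (PySem.Dict.empty, alo, blo, 0)
  let (besti, bestj, bestsize) := pvExtendBack a b alo blo st.2.1 st.2.2.1 st.2.2.2
  (besti, bestj, pvExtendFwd a b ahi bhi besti bestj bestsize)

-- get_matching_blocks queue loop; the head of `queue` is the top of Python's stack (append/pop at the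
-- end).  Fuel 2*len(a)+2 bounds the number of pops (≤ 2*len(a)+1: blocks found are disjoint in a).
def pvMbLoop (a b : List String) (b2j : PySem.Dict String (List Nat)) :
    Nat → List (Nat × Nat × Nat × Nat) → List PvBlock → List PvBlock
  | 0, _, acc => acc
  | _ + 1, [], acc => acc
  | fuel + 1, (alo, ahi, blo, bhi) :: rest, acc =>
    let (i, j, k) := pvFindLongestMatch a b b2j alo ahi blo bhi
    if k ≠ 0 then
      let q := if alo < i ∧ blo < j then (alo, i, blo, j) :: rest else rest
      let q := if i + k < ahi ∧ j + k < bhi then (i + k, ahi, j + k, bhi) :: q else q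
      pvMbLoop a b b2j fuel q (acc ++ [(i, j, k)])
    else pvMbLoop a b b2j fuel rest acc

-- Python's tuple sort: lexicographic ≤ on (i, j, k)
def pvBlockLE (x y : PvBlock) : Bool :=
  x.1 < y.1 || (x.1 = y.1 && (x.2.1 < y.2.1 || (x.2.1 = y.2.1 && x.2.2 ≤ y.2.2)))

-- the adjacent-block merging loop of get_matching_blocks; args: remaining blocks, (i1, j1, k1)
def pvMergeAdj : List PvBlock → Nat → Nat → Nat → List PvBlock
  | [], i1, j1, k1 => if k1 ≠ 0 then [(i1, j1, k1)] else []
  | (i2, j2, k2) :: rest, i1, j1, k1 =>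
    if i1 + k1 = i2 ∧ j1 + k1 = j2 then pvMergeAdj rest i1 j1 (k1 + k2)
    else if k1 ≠ 0 then (i1, j1, k1) :: pvMergeAdj rest i2 j2 k2
    else pvMergeAdj rest i2 j2 k2

-- matcher.get_matching_blocks()
def pvGetMatchingBlocks (a b : List String) : List PvBlock :=
  let raw := pvMbLoop a b (pvB2j b) (2 * a.length + 2) [(0, a.length, 0, b.length)] []
  pvMergeAdj (raw.mergeSort (fun x y => pvBlockLE x y)) 0 0 0 ++ [(a.length, b.length, 0)]

-- matcher.get_opcodes(), derived from the matching blocks exactly as difflib does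
def pvOpcodesOf : List PvBlock → Nat → Nat → List (String × Nat × Nat × Nat × Nat)
  | [], _, _ => []
  | (ai, bj, sz) :: rest, i, j =>
    (if i < ai ∧ j < bj then [("replace", i, ai, j, bj)]
     else if i < ai then [("delete", i, ai, j, bj)]
     else if j < bj then [("insert", i, ai, j, bj)]
     else []) ++
      (if sz ≠ 0 then [("equal", ai, ai + sz, bj, bj + sz)] else []) ++
      pvOpcodesOf rest (ai + sz) (bj + sz)

-- offsets[start+t] = v for t in range(n); indices are in range by difflib's invariants
-- (List.set is then exactly Python's item assignment)
def pvFillConst (off : List Int) (start n : Nat) (v : Int) : List Int :=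
  (List.range n).foldl (fun o t => o.set (start + t) v) off

-- offsets[j1+t] = i1+t+1 for t in range(n): A's enumerate loop
def pvFillEq (off : List Int) (j1 i1 n : Nat) : List Int :=
  (List.range n).foldl (fun o t => o.set (j1 + t) ((i1 : Int) + t + 1)) off

-- the body of A's `for tag, i1, i2, j1, j2 in matcher.get_opcodes()` loop
def pvAStep (original : List String) (off : List Int) (op : String × Nat × Nat × Nat × Nat) : List Int :=
  let (tag, i1, i2, j1, j2) := op
  if tag = "equal" then pvFillEq off j1 i1 (i2 - i1)
  else
    let fallback : Int := if original ≠ [] then min ((i1 : Int) + 1) (original.length : Int) else 1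
    let fallback := if fallback ≤ 0 then 1 else fallback
    pvFillConst off j1 (j2 - j1) fallback

def compute_line_offsets_py (original : List String) (processed : List String) : List Int :=
  if processed = [] then []
  else
    (pvOpcodesOf (pvGetMatchingBlocks original processed) 0 0).foldl
      (pvAStep original) (List.replicate processed.length 0)

-- ===== PORT B =====

-- B's inner `for j in range(blo, bhi)` loop; state = (new row, bi, bj, bk), `run` is the row above
def pvInner (a b : List String) (blo bhi i : Nat) (run : List Nat)
    (st0 : List Nat × Nat × Nat × Nat) : List Nat × Nat × Nat × Nat :=
  (List.range' blo (bhi - blo)).foldl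
    (fun st j =>
      let (new, bi, bj, bk) := st
      if a.getD i "" = b.getD j "" then
        let k := (if blo < j then run.getD (j - blo - 1) 0 else 0) + 1
        let new := new.set (j - blo) k
        if bk < k then (new, i + 1 - k, j + 1 - k, k) else (new, bi, bj, bk)
      else st)
    st0

-- B's `longest`: dense DP row over the region, earliest maximal run by strict improvement
def pvLongest (a b : List String) (alo ahi blo bhi : Nat) : PvBlock :=
  let st := (List.range' alo (ahi - alo)).foldl
    (fun (st : List Nat × Nat × Nat × Nat) i =>
      let (run, bi, bj, bk) := st
      pvInner a b blo bhi i run (List.replicate (bhi - blo) 0, bi, bj, bk))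
    (List.replicate (bhi - blo) 0, alo, blo, 0)
  st.2

-- B's divide and conquer: blocks of a region in ascending order.  The fuel argument is a pure
-- totality guard (the recursion consumes a strictly smaller a-span; fuel span+1 never runs out,
-- proved below); it changes nothing about the computation.
def pvBlocks (a b : List String) : Nat → Nat → Nat → Nat → Nat → List PvBlock
  | 0, _, _, _, _ => []
  | fuel + 1, alo, ahi, blo, bhi =>
    let r := pvLongest a b alo ahi blo bhi
    if r.2.2 = 0 then []
    else
      pvBlocks a b fuel alo r.1 blo r.2.1 ++ [r]
        ++ pvBlocks a b fuel (r.1 + r.2.2) ahi (r.2.1 + r.2.2) bhi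

-- the body of B's final loop; state = (out, prev_i); `out += [gap]*(j-len(out)); out += range(...)`
def pvBStepApp (original : List String) (st : List Int × Nat) (blk : PvBlock) : List Int × Nat :=
  let (out, pi) := st
  let (i, j, k) := blk
  let gap : Int := if original ≠ [] then min ((pi : Int) + 1) (original.length : Int) else 1
  let out := out ++ List.replicate (j - out.length) gap
  (out ++ (List.range k).map (fun t : Nat => (i : Int) + t + 1), i + k)

def compute_line_offsets_py_alt (original : List String) (processed : List String) : List Int :=
  if processed = [] then []
  else
    ((pvBlocks original processed (original.length + 1) 0 original.length 0 processed.length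
        ++ [(original.length, processed.length, 0)]).foldl
      (pvBStepApp original) ([], 0)).1

-- ===== PRECONDITION & SPEC =====
def Spec_compute_line_offsets_py (original : List String) (processed : List String) (out : List Int) : Prop := out = compute_line_offsets_py_alt original processed
instance (original : List String) (processed : List String) (out : List Int) : Decidable (Spec_compute_line_offsets_py original processed out) := by unfold Spec_compute_line_offsets_py; infer_instance

-- ===== CLAIM (what is proved, stated in full; the proofs are below) =====
def Claim_equal_compute_line_offsets_py : Prop := ∀ (original : List String) (processed : List String), Dom_compute_line_offsets_py original processed → Spec_compute_line_offsets_py original processed (compute_line_offsets_py original processed)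

-- ===== LEMMAS AND PROOFS =====

-- ---------- semantic layer: run lengths ----------

-- run length of the common run of a, b ending at (i, j), clipped at alo/blo
def pvR (a b : List String) (alo blo : Nat) : Nat → Nat → Nat
  | i, j =>
    if a.getD i "" = b.getD j "" then
      (if alo < i ∧ blo < j then pvR a b alo blo (i - 1) (j - 1) else 0) + 1
    else 0
  termination_by i _ => i
  decreasing_by omega

lemma pvR_le (a b : List String) (alo blo : Nat) (i j : Nat) :
    pvR a b alo blo i j ≤ i - alo + 1 ∧ pvR a b alo blo i j ≤ j - blo + 1 := by
  induction i using Nat.strong_induction_on generalizing j with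
  | _ i ih =>
    rw [pvR]
    split_ifs with h1 h2
    · have := ih (i - 1) (by omega) (j - 1)
      omega
    · omega
    · omega

lemma pvR_matches (a b : List String) (alo blo : Nat) (i j : Nat) :
    ∀ s, s < pvR a b alo blo i j → a.getD (i - s) "" = b.getD (j - s) "" := by
  induction i using Nat.strong_induction_on generalizing j with
  | _ i ih =>
    intro s hs
    rw [pvR] at hs
    split_ifs at hs with h1 h2
    · match s with
      | 0 => simpa using h1
      | s + 1 =>
        have := ih (i - 1) (by omega) (j - 1) s (by omega)
        have hi : i - (s + 1) = i - 1 - s := by omega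
        have hj : j - (s + 1) = j - 1 - s := by omega
        rw [hi, hj]; exact this
    · match s with
      | 0 => simpa using h1
      | s + 1 => omega
    · omega

lemma pvR_lower (a b : List String) (alo blo : Nat) (i j : Nat) (t : Nat)
    (hm : ∀ s, s < t → a.getD (i - s) "" = b.getD (j - s) "")
    (h1 : t ≤ i - alo + 1) (h2 : t ≤ j - blo + 1) :
    t ≤ pvR a b alo blo i j := by
  induction t generalizing i j with
  | zero => omega
  | succ t ih =>
    have hm0 : a.getD i "" = b.getD j "" := by simpa using hm 0 (by omega)
    rw [pvR, if_pos hm0]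
    by_cases hb : alo < i ∧ blo < j
    · rw [if_pos hb]
      have : t ≤ pvR a b alo blo (i - 1) (j - 1) := by
        apply ih
        · intro s hs
          have := hm (s + 1) (by omega)
          have hi : i - (s + 1) = i - 1 - s := by omega
          have hj : j - (s + 1) = j - 1 - s := by omega
          rw [hi, hj] at this; exact this
        · omega
        · omega
      omega
    · rw [if_neg hb]; omega

-- ---------- semantic invariant of B's DP fold ----------

-- value of the DP row after c rows of the region have been processed
def pvRunVal (a b : List String) (alo blo : Nat) (c t : Nat) : Nat :=
  if c = 0 then 0 else pvR a b alo blo (alo + c - 1) (blo + t)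

-- full invariant of pvLongest's fold state after c rows
def pvStOK (a b : List String) (alo blo bhi c : Nat) (st : List Nat × Nat × Nat × Nat) : Prop :=
  st.1.length = bhi - blo ∧
  (∀ t, t < bhi - blo → st.1.getD t 0 = pvRunVal a b alo blo c t) ∧
  (∀ i j, alo ≤ i → i < alo + c → blo ≤ j → j < bhi → pvR a b alo blo i j ≤ st.2.2.2) ∧
  (st.2.2.2 = 0 → st.2 = (alo, blo, 0)) ∧
  (st.2.2.2 ≠ 0 →
     alo ≤ st.2.1 ∧ blo ≤ st.2.2.1 ∧ st.2.1 + st.2.2.2 ≤ alo + c ∧ st.2.2.1 + st.2.2.2 ≤ bhi ∧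
     pvR a b alo blo (st.2.1 + st.2.2.2 - 1) (st.2.2.1 + st.2.2.2 - 1) = st.2.2.2)

lemma pvInner_sem (a b : List String) (alo blo bhi c : Nat) (run : List Nat)
    (best : Nat × Nat × Nat) (h : pvStOK a b alo blo bhi c (run, best)) :
    pvStOK a b alo blo bhi (c + 1)
      (pvInner a b blo bhi (alo + c) run (List.replicate (bhi - blo) 0, best)) := by
  obtain ⟨hlen, hrow, hU, h0, hW⟩ := h
  simp only at hlen hrow hU h0 hW
  set i := alo + c with hidef
  -- mid-loop invariant after processing columns blo..blo+d-1 of row i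
  let Mid : Nat → (List Nat × Nat × Nat × Nat) → Prop := fun d st =>
    st.1.length = bhi - blo ∧
    (∀ t, t < bhi - blo → st.1.getD t 0 = if t < d then pvR a b alo blo i (blo + t) else 0) ∧
    (∀ i' j, alo ≤ i' → i' < i → blo ≤ j → j < bhi → pvR a b alo blo i' j ≤ st.2.2.2) ∧
    (∀ t, t < d → pvR a b alo blo i (blo + t) ≤ st.2.2.2) ∧
    (st.2.2.2 = 0 → st.2 = (alo, blo, 0)) ∧
    (st.2.2.2 ≠ 0 →
      alo ≤ st.2.1 ∧ blo ≤ st.2.2.1 ∧ st.2.1 + st.2.2.2 ≤ i + 1 ∧ st.2.2.1 + st.2.2.2 ≤ bhi ∧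
      pvR a b alo blo (st.2.1 + st.2.2.2 - 1) (st.2.2.1 + st.2.2.2 - 1) = st.2.2.2)
  have key : ∀ d, d ≤ bhi - blo →
      Mid d ((List.range' blo d).foldl
        (fun st j =>
          let (new, bi, bj, bk) := st
          if a.getD i "" = b.getD j "" then
            let k := (if blo < j then run.getD (j - blo - 1) 0 else 0) + 1
            let new := new.set (j - blo) k
            if bk < k then (new, i + 1 - k, j + 1 - k, k) else (new, bi, bj, bk)
          else st)
        (List.replicate (bhi - blo) 0, best)) := by
    intro d
    induction d with
    | zero =>
      intro _
      simp only [List.range'_zero, List.foldl_nil]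
      refine ⟨by simp, by intro t ht; simp, ?_, by omega, ?_, ?_⟩
      · intro i' j h1 h2 h3 h4
        exact hU i' j h1 h2 h3 h4
      · intro hz; exact h0 hz
      · intro hz
        obtain ⟨w1, w2, w3, w4, w5⟩ := hW hz
        exact ⟨w1, w2, show best.1 + best.2.2 ≤ i + 1 by omega, w4, w5⟩
    | succ d ih =>
      intro hd
      have hd' : d ≤ bhi - blo := by omega
      have hjlt : blo + d < bhi := by omega
      rw [List.range'_1_concat, List.foldl_append, List.foldl_cons, List.foldl_nil]
      obtain ⟨m1, m2, m3, m4, m5, m6⟩ := ih hd'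
      set st := (List.range' blo d).foldl _ (List.replicate (bhi - blo) 0, best) with hst
      obtain ⟨new, bi, bj, bk⟩ := st
      simp only at m1 m2 m3 m4 m5 m6 ⊢
      by_cases hmatch : a.getD i "" = b.getD (blo + d) ""
      · rw [if_pos hmatch]
        -- the computed k is exactly the run length ending at (i, blo + d)
        have hk : (if blo < blo + d then run.getD (blo + d - blo - 1) 0 else 0) + 1 =
            pvR a b alo blo i (blo + d) := by
          rw [pvR, if_pos hmatch]
          congr 1
          by_cases hd0 : d = 0
          · subst hd0
            rw [if_neg (by omega), if_neg (by omega)]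
          · rw [if_pos (by omega)]
            have e : blo + d - blo - 1 = d - 1 := by omega
            rw [e, hrow (d - 1) (by omega)]
            unfold pvRunVal
            by_cases hc : c = 0
            · rw [if_pos hc, if_neg (by omega)]
            · rw [if_neg hc, if_pos (by omega),
                show alo + c - 1 = i - 1 by omega, show blo + (d - 1) = blo + d - 1 by omega]
        simp only [hk]
        have hkle1 : pvR a b alo blo i (blo + d) ≤ i - alo + 1 := (pvR_le a b alo blo i _).1
        have hkle2 : pvR a b alo blo i (blo + d) ≤ (blo + d) - blo + 1 :=
          (pvR_le a b alo blo i _).2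
        have hrownew : ∀ t, t < bhi - blo →
            (new.set (blo + d - blo) (pvR a b alo blo i (blo + d))).getD t 0 =
              if t < d + 1 then pvR a b alo blo i (blo + t) else 0 := by
          intro t ht
          have hdd : blo + d - blo = d := by omega
          rw [hdd]
          by_cases hted : t = d
          · subst hted
            rw [List.getD_eq_getElem?_getD, List.getElem?_set_self (by omega)]
            simp
          · rw [List.getD_eq_getElem?_getD, List.getElem?_set_ne (by omega),
              ← List.getD_eq_getElem?_getD, m2 t ht]
            by_cases h1 : t < d
            · rw [if_pos h1, if_pos (by omega)]
            · rw [if_neg h1, if_neg (by omega)]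
        by_cases hup : bk < pvR a b alo blo i (blo + d)
        · rw [if_pos hup]
          simp only [Mid]
          refine ⟨by simpa using m1, hrownew, ?_, ?_, ?_, ?_⟩
          · intro i' j h1 h2 h3 h4
            have := m3 i' j h1 h2 h3 h4; omega
          · intro t ht
            by_cases h1 : t < d
            · have := m4 t h1; omega
            · have : t = d := by omega
              subst this; omega
          · intro hz; omega
          · intro _
            refine ⟨by omega, by omega, by omega, by omega, ?_⟩
            have e1 : i + 1 - pvR a b alo blo i (blo + d) + pvR a b alo blo i (blo + d) - 1 = i := by
              omega
            have e2 : blo + d + 1 - pvR a b alo blo i (blo + d) + pvR a b alo blo i (blo + d) - 1 =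
                blo + d := by omega
            rw [e1, e2]
        · rw [if_neg hup]
          simp only [Mid]
          refine ⟨by simpa using m1, hrownew, m3, ?_, m5, m6⟩
          intro t ht
          by_cases h1 : t < d
          · exact m4 t h1
          · have : t = d := by omega
            subst this; omega
      · rw [if_neg hmatch]
        have hz : pvR a b alo blo i (blo + d) = 0 := by rw [pvR, if_neg hmatch]
        simp only [Mid]
        refine ⟨m1, ?_, m3, ?_, m5, m6⟩
        · intro t ht
          rw [m2 t ht]
          by_cases h1 : t < d
          · rw [if_pos h1, if_pos (by omega)]
          · rw [if_neg h1]
            by_cases h2 : t < d + 1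
            · have : t = d := by omega
              subst this
              rw [if_pos h2, hz]
            · rw [if_neg h2]
        · intro t ht
          by_cases h1 : t < d
          · exact m4 t h1
          · have : t = d := by omega
            subst this
            rw [hz]; omega
  have final := key (bhi - blo) (le_refl _)
  obtain ⟨f1, f2, f3, f4, f5, f6⟩ := final
  simp only [pvInner]
  refine ⟨f1, ?_, ?_, f5, ?_⟩
  · intro t ht
    have := f2 t ht
    rw [if_pos ht] at this
    rw [this]
    unfold pvRunVal
    rw [if_neg (by omega), show alo + (c + 1) - 1 = i by omega]
  · intro i' j h1 h2 h3 h4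
    by_cases hlt : i' < i
    · exact f3 i' j h1 hlt h3 h4
    · have hii : i' = i := by omega
      subst hii
      have := f4 (j - blo) (by omega)
      have e : blo + (j - blo) = j := by omega
      rw [e] at this
      exact this
  · intro hz
    obtain ⟨w1, w2, w3, w4, w5⟩ := f6 hz
    exact ⟨w1, w2, by omega, w4, w5⟩

lemma pvLongest_sem (a b : List String) (alo ahi blo bhi : Nat) :
    ∃ run, pvStOK a b alo blo bhi (ahi - alo) (run, pvLongest a b alo ahi blo bhi) := by
  have key : ∀ n, pvStOK a b alo blo bhi n
      ((List.range' alo n).foldl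
        (fun (st : List Nat × Nat × Nat × Nat) i =>
          let (run, bi, bj, bk) := st
          pvInner a b blo bhi i run (List.replicate (bhi - blo) 0, bi, bj, bk))
        (List.replicate (bhi - blo) 0, alo, blo, 0)) := by
    intro n
    induction n with
    | zero =>
      refine ⟨by simp, by intro t ht; simp [pvRunVal], ?_, fun _ => rfl, fun hz => absurd rfl hz⟩
      intro i' j h1 h2 h3 h4
      omega
    | succ n ih =>
      rw [List.range'_1_concat, List.foldl_append, List.foldl_cons, List.foldl_nil]
      have step := pvInner_sem a b alo blo bhi n
        ((List.range' alo n).foldl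
          (fun (st : List Nat × Nat × Nat × Nat) i =>
            let (run, bi, bj, bk) := st
            pvInner a b blo bhi i run (List.replicate (bhi - blo) 0, bi, bj, bk))
          (List.replicate (bhi - blo) 0, alo, blo, 0)).1
        ((List.range' alo n).foldl
          (fun (st : List Nat × Nat × Nat × Nat) i =>
            let (run, bi, bj, bk) := st
            pvInner a b blo bhi i run (List.replicate (bhi - blo) 0, bi, bj, bk))
          (List.replicate (bhi - blo) 0, alo, blo, 0)).2
        (by simpa using ih)
      simpa using step
  exact ⟨((List.range' alo (ahi - alo)).foldl
      (fun (st : List Nat × Nat × Nat × Nat) i =>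
        let (run, bi, bj, bk) := st
        pvInner a b blo bhi i run (List.replicate (bhi - blo) 0, bi, bj, bk))
      (List.replicate (bhi - blo) 0, alo, blo, 0)).1,
    by simpa [pvLongest] using key (ahi - alo)⟩

-- usable corollary: region bounds of a nonzero best
lemma pvLongest_facts (a b : List String) (alo ahi blo bhi : Nat)
    (h : (pvLongest a b alo ahi blo bhi).2.2 ≠ 0) :
    alo ≤ (pvLongest a b alo ahi blo bhi).1 ∧
    (pvLongest a b alo ahi blo bhi).1 + (pvLongest a b alo ahi blo bhi).2.2 ≤ ahi ∧
    blo ≤ (pvLongest a b alo ahi blo bhi).2.1 ∧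
    (pvLongest a b alo ahi blo bhi).2.1 + (pvLongest a b alo ahi blo bhi).2.2 ≤ bhi := by
  obtain ⟨run, stok⟩ := pvLongest_sem a b alo ahi blo bhi
  obtain ⟨-, -, -, -, hW⟩ := stok
  simp only at hW
  obtain ⟨w1, w2, w3, w4, -⟩ := hW h
  exact ⟨w1, by omega, w2, w4⟩

-- ---------- A's extension loops are no-ops on B's maximal best ----------

lemma pvExtendBack_eq (a b : List String) (alo blo bi bj bk : Nat)
    (h0 : bk = 0 → bi = alo ∧ bj = blo)
    (hw : bk ≠ 0 → alo ≤ bi ∧ blo ≤ bj ∧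
      pvR a b alo blo (bi + bk - 1) (bj + bk - 1) = bk) :
    pvExtendBack a b alo blo bi bj bk = (bi, bj, bk) := by
  rw [pvExtendBack]
  rw [dif_neg]
  intro ⟨g1, g2, g3⟩
  by_cases hz : bk = 0
  · obtain ⟨e1, e2⟩ := h0 hz
    omega
  · obtain ⟨w1, w2, w5⟩ := hw hz
    have hlow : bk + 1 ≤ pvR a b alo blo (bi + bk - 1) (bj + bk - 1) := by
      apply pvR_lower
      · intro s hs
        by_cases hsb : s < bk
        · exact pvR_matches a b alo blo _ _ s (by omega)
        · have e1 : bi + bk - 1 - s = bi - 1 := by omega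
          have e2 : bj + bk - 1 - s = bj - 1 := by omega
          rw [e1, e2]; exact g3
      · omega
      · omega
    omega

lemma pvExtendFwd_eq (a b : List String) (alo ahi blo bhi bi bj bk : Nat)
    (hU : ∀ i j, alo ≤ i → i < ahi → blo ≤ j → j < bhi → pvR a b alo blo i j ≤ bk)
    (h0 : bk = 0 → bi = alo ∧ bj = blo)
    (hw : bk ≠ 0 → alo ≤ bi ∧ blo ≤ bj ∧
      pvR a b alo blo (bi + bk - 1) (bj + bk - 1) = bk) :
    pvExtendFwd a b ahi bhi bi bj bk = bk := by
  rw [pvExtendFwd]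
  rw [dif_neg]
  intro ⟨g1, g2, g3⟩
  have hbig : bk + 1 ≤ pvR a b alo blo (bi + bk) (bj + bk) := by
    rw [pvR, if_pos g3]
    by_cases hz : bk = 0
    · omega
    · obtain ⟨w1, w2, w5⟩ := hw hz
      rw [if_pos (by omega), w5]
  have hle : pvR a b alo blo (bi + bk) (bj + bk) ≤ bk := by
    apply hU
    · by_cases hz : bk = 0
      · obtain ⟨e1, e2⟩ := h0 hz
        omega
      · obtain ⟨w1, -, -⟩ := hw hz
        omega
    · omega
    · by_cases hz : bk = 0
      · obtain ⟨e1, e2⟩ := h0 hz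
        omega
      · obtain ⟨-, w2, -⟩ := hw hz
        omega
    · omega
  omega

-- ---------- simulation: difflib's find_longest_match = B's pvLongest ----------

-- the dict of difflib's inner loop holds exactly B's row, shifted by blo
def pvDictRel (blo bhi : Nat) (d : PySem.Dict Nat Nat) (run : List Nat) : Prop :=
  ∀ j : Nat, d.getD j 0 = if blo ≤ j ∧ j < bhi then run.getD (j - blo) 0 else 0

lemma pvB2j_getD (b : List String) (x : String) :
    (pvB2j b).getD x [] = (List.range b.length).filter (fun j => b.getD j "" == x) := by
  have aux : ∀ (n : Nat) (d : PySem.Dict String (List Nat)),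
      ((List.range n).foldl
        (fun d i => d.insert (b.getD i "") ((d.getD (b.getD i "") []) ++ [i])) d).getD x []
        = d.getD x [] ++ (List.range n).filter (fun j => b.getD j "" == x) := by
    intro n
    induction n with
    | zero => intro d; simp
    | succ n ih =>
      intro d
      rw [List.range_succ, List.foldl_append, List.foldl_cons, List.foldl_nil,
        PySem.Dict.getD_insert, List.filter_append]
      by_cases hx : x = b.getD n ""
      · rw [if_pos hx, ← hx, ih]
        have hb : (b.getD n "" == x) = true := beq_iff_eq.mpr hx.symm
        have hf : (List.filter (fun j => b.getD j "" == x) [n]) = [n] := by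
          simp [List.filter_cons]
          rw [← List.getD_eq_getElem?_getD]
          exact hx.symm
        rw [hf, List.append_assoc]
      · rw [if_neg hx, ih]
        have hb : (b.getD n "" == x) = false := beq_eq_false_iff_ne.mpr (fun h => hx h.symm)
        have hf : (List.filter (fun j => b.getD j "" == x) [n]) = [] := by
          simp [List.filter_cons]
          rw [← List.getD_eq_getElem?_getD]
          exact fun h => hx h.symm
        rw [hf, List.append_nil]
  rw [pvB2j, aux]
  simp

-- the in-range body of difflib's inner loop
def pvAStepCore (j2len : PySem.Dict Nat Nat) (i : Nat)
    (st : PySem.Dict Nat Nat × Nat × Nat × Nat) (j : Nat) :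
    PySem.Dict Nat Nat × Nat × Nat × Nat :=
  let (nj, besti, bestj, bestsize) := st
  let k := (if j = 0 then 0 else j2len.getD (j - 1) 0) + 1
  let nj := nj.insert j k
  if bestsize < k then (nj, i + 1 - k, j + 1 - k, k) else (nj, besti, bestj, bestsize)

-- the matching body of B's inner loop
def pvBStepCore (run : List Nat) (blo i : Nat)
    (st : List Nat × Nat × Nat × Nat) (j : Nat) : List Nat × Nat × Nat × Nat :=
  let (new, bi, bj, bk) := st
  let k := (if blo < j then run.getD (j - blo - 1) 0 else 0) + 1
  let new := new.set (j - blo) k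
  if bk < k then (new, i + 1 - k, j + 1 - k, k) else (new, bi, bj, bk)

-- skip and break of the A-side loop are a filter (on an ascending list)
lemma pvFlmInner_eq_foldl (j2len : PySem.Dict Nat Nat) (blo bhi i : Nat) :
    ∀ (js : List Nat), js.Pairwise (· < ·) → ∀ st,
      pvFlmInner j2len blo bhi i js st =
        (js.filter (fun j => decide (blo ≤ j) && decide (j < bhi))).foldl
          (pvAStepCore j2len i) st := by
  intro js
  induction js with
  | nil => intro _ st; simp [pvFlmInner]
  | cons j rest ih =>
    intro hp st
    have hp' := (List.pairwise_cons.mp hp).2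
    have hhd := (List.pairwise_cons.mp hp).1
    rw [pvFlmInner]
    by_cases h1 : j < blo
    · rw [if_pos h1, List.filter_cons]
      rw [if_neg (by simp; omega)]
      exact ih hp' st
    · rw [if_neg h1]
      by_cases h2 : bhi ≤ j
      · rw [if_pos h2]
        have : (List.filter (fun j => decide (blo ≤ j) && decide (j < bhi)) (j :: rest)) = [] := by
          rw [List.filter_eq_nil_iff]
          intro x hx
          rcases List.mem_cons.mp hx with h | h
          · subst h; simp; omega
          · have := hhd x h; simp; omega
        rw [this, List.foldl_nil]
      · rw [if_neg h2]
        have hfc : (List.filter (fun j => decide (blo ≤ j) && decide (j < bhi)) (j :: rest))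
            = j :: List.filter (fun j => decide (blo ≤ j) && decide (j < bhi)) rest := by
          rw [List.filter_cons, if_pos (by simp; omega)]
        rw [hfc, List.foldl_cons]
        obtain ⟨nj, bi2, bj2, bk2⟩ := st
        simp only [pvAStepCore]
        by_cases hup : bk2 < (if j = 0 then 0 else j2len.getD (j - 1) 0) + 1
        · rw [if_pos hup, if_pos hup, ih hp']
        · rw [if_neg hup, if_neg hup, ih hp']

-- a fold that ignores non-matching elements is a fold over the matching ones
lemma pvFoldlFilter {alpha gamma : Type} (f : alpha → gamma → alpha) (g : alpha → gamma → alpha)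
    (p : gamma → Bool) :
    ∀ (l : List gamma), (∀ s x, p x = true → f s x = g s x) → (∀ s x, p x = false → f s x = s) →
      ∀ s, l.foldl f s = (l.filter p).foldl g s := by
  intro l
  induction l with
  | nil => intro _ _ _; rfl
  | cons x r ih =>
    intro h1 h2 s
    rw [List.foldl_cons, List.filter_cons]
    by_cases hp : p x = true
    · rw [if_pos hp, List.foldl_cons, h1 s x hp]
      exact ih h1 h2 _
    · rw [if_neg (by simpa using hp), h2 s x (by simpa using hp)]
      exact ih h1 h2 s

-- the two filtered column lists coincide
lemma pvFilterRange (n blo bhi : Nat) (hb : bhi ≤ n) (q : Nat → Bool) :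
    ((List.range n).filter (fun j => q j)).filter
        (fun j => decide (blo ≤ j) && decide (j < bhi))
      = (List.range' blo (bhi - blo)).filter (fun j => q j) := by
  rw [List.filter_filter]
  by_cases hlo : blo ≤ bhi
  · have hsplit : List.range n =
        List.range' 0 blo ++ List.range' blo (bhi - blo) ++ List.range' bhi (n - bhi) := by
      rw [List.range_eq_range', show n = blo + ((bhi - blo) + (n - bhi)) by omega,
        ← List.range'_append_1, ← List.range'_append_1]
      simp only [Nat.zero_add]
      rw [show blo + (bhi - blo) = bhi by omega, List.append_assoc,
        show blo + (bhi - blo + (n - bhi)) - bhi = n - bhi by omega]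
    rw [hsplit, List.filter_append, List.filter_append]
    have h1 : (List.range' 0 blo).filter
        (fun j => (decide (blo ≤ j) && decide (j < bhi)) && q j) = [] := by
      rw [List.filter_eq_nil_iff]
      intro x hx
      have := List.mem_range'_1.mp hx
      simp
      omega
    have h3 : (List.range' bhi (n - bhi)).filter
        (fun j => (decide (blo ≤ j) && decide (j < bhi)) && q j) = [] := by
      rw [List.filter_eq_nil_iff]
      intro x hx
      have := List.mem_range'_1.mp hx
      simp
      omega
    rw [h1, h3, List.nil_append, List.append_nil]
    apply List.filter_congr
    intro x hx
    have := List.mem_range'_1.mp hx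
    simp
    omega
  · have h0 : bhi - blo = 0 := by omega
    rw [h0]
    rw [List.range'_zero, List.filter_nil, List.filter_eq_nil_iff]
    intro x _
    simp
    omega

-- generic two-fold simulation
lemma pvFoldRel {α β γ : Type} (R : α → β → Prop) (f : α → γ → α) (g : β → γ → β)
    (l : List γ) (h : ∀ x ∈ l, ∀ s t, R s t → R (f s x) (g t x)) :
    ∀ s t, R s t → R (l.foldl f s) (l.foldl g t) := by
  intro s t hst
  induction l generalizing s t with
  | nil => exact hst
  | cons x r ih =>
    exact ih (fun y hy => h y (List.mem_cons_of_mem _ hy)) _ _ (h x (List.mem_cons_self ..) s t hst)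

-- one in-range matching column: the two step bodies stay related
lemma pvCore_sim (j2len : PySem.Dict Nat Nat) (run : List Nat) (blo bhi i j : Nat)
    (hd : pvDictRel blo bhi j2len run)
    (hj : blo ≤ j) (hj2 : j < bhi)
    (tA : PySem.Dict Nat Nat × Nat × Nat × Nat) (tB : List Nat × Nat × Nat × Nat)
    (h1 : pvDictRel blo bhi tA.1 tB.1) (h2 : tB.1.length = bhi - blo) (h3 : tA.2 = tB.2) :
    pvDictRel blo bhi (pvAStepCore j2len i tA j).1 (pvBStepCore run blo i tB j).1 ∧
      (pvBStepCore run blo i tB j).1.length = bhi - blo ∧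
      (pvAStepCore j2len i tA j).2 = (pvBStepCore run blo i tB j).2 := by
  obtain ⟨nj, bi0, bj0, bk0⟩ := tA
  obtain ⟨new, bi1, bj1, bk1⟩ := tB
  simp only at h1 h2 h3
  have e1 : bi0 = bi1 := congrArg Prod.fst h3
  have e2 : bj0 = bj1 := congrArg (fun p => p.2.1) h3
  have e3 : bk0 = bk1 := congrArg (fun p => p.2.2) h3
  subst e1; subst e2; subst e3
  have hk : (if j = 0 then 0 else j2len.getD (j - 1) 0) =
      (if blo < j then run.getD (j - blo - 1) 0 else 0) := by
    by_cases hbj : blo < j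
    · rw [if_neg (by omega), if_pos hbj]
      have := hd (j - 1)
      rw [if_pos (by omega)] at this
      rw [this, show j - 1 - blo = j - blo - 1 by omega]
    · have hjb : j = blo := by omega
      rw [if_neg hbj]
      by_cases hz : j = 0
      · rw [if_pos hz]
      · rw [if_neg hz]
        have := hd (j - 1)
        rw [if_neg (by omega)] at this
        exact this
  simp only [pvAStepCore, pvBStepCore, hk]
  set k : Nat := (if blo < j then run.getD (j - blo - 1) 0 else 0) + 1 with hkdef
  have hnew : pvDictRel blo bhi (nj.insert j k) (new.set (j - blo) k) := by
    intro j'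
    rw [PySem.Dict.getD_insert]
    by_cases hjj : j' = j
    · subst hjj
      rw [if_pos rfl, if_pos ⟨hj, hj2⟩, List.getD_eq_getElem?_getD,
        List.getElem?_set_self (by omega)]
      simp
    · rw [if_neg hjj]
      have hold := h1 j'
      by_cases hin : blo ≤ j' ∧ j' < bhi
      · rw [if_pos hin] at hold ⊢
        rw [List.getD_eq_getElem?_getD, List.getElem?_set_ne (by omega),
          ← List.getD_eq_getElem?_getD]
        exact hold
      · rw [if_neg hin] at hold ⊢
        exact hold
  split_ifs with hup
  · exact ⟨hnew, by simp [h2], rfl⟩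
  · exact ⟨hnew, by simp [h2], rfl⟩

lemma pvFindLongest_eq (a b : List String) (alo ahi blo bhi : Nat)
    (hab : blo ≤ bhi) (hb : bhi ≤ b.length) :
    pvFindLongestMatch a b (pvB2j b) alo ahi blo bhi = pvLongest a b alo ahi blo bhi := by
  -- Step 1: the pre-extension folds are related
  have hrow : ∀ (i : Nat) (sA : PySem.Dict Nat Nat × Nat × Nat × Nat)
      (sB : List Nat × Nat × Nat × Nat),
      pvDictRel blo bhi sA.1 sB.1 → sB.1.length = bhi - blo → sA.2 = sB.2 →
        pvDictRel blo bhi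
            (pvFlmInner sA.1 blo bhi i ((pvB2j b).getD (a.getD i "") [])
              (PySem.Dict.empty, sA.2.1, sA.2.2.1, sA.2.2.2)).1
            (pvInner a b blo bhi i sB.1 (List.replicate (bhi - blo) 0,
              sB.2.1, sB.2.2.1, sB.2.2.2)).1 ∧
          (pvInner a b blo bhi i sB.1 (List.replicate (bhi - blo) 0,
            sB.2.1, sB.2.2.1, sB.2.2.2)).1.length = bhi - blo ∧
          (pvFlmInner sA.1 blo bhi i ((pvB2j b).getD (a.getD i "") [])
            (PySem.Dict.empty, sA.2.1, sA.2.2.1, sA.2.2.2)).2 =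
          (pvInner a b blo bhi i sB.1 (List.replicate (bhi - blo) 0,
            sB.2.1, sB.2.2.1, sB.2.2.2)).2 := by
    intro i sA sB hdict hlen hbest
    -- A side: filter form
    have hasc : ((pvB2j b).getD (a.getD i "") []).Pairwise (· < ·) := by
      rw [pvB2j_getD]
      exact List.Pairwise.filter _ List.pairwise_lt_range
    rw [pvFlmInner_eq_foldl sA.1 blo bhi i _ hasc, pvB2j_getD,
      pvFilterRange b.length blo bhi hb (fun j => b.getD j "" == a.getD i "")]
    -- B side: filter form
    have hbfold : pvInner a b blo bhi i sB.1 (List.replicate (bhi - blo) 0,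
        sB.2.1, sB.2.2.1, sB.2.2.2) =
        ((List.range' blo (bhi - blo)).filter (fun j => b.getD j "" == a.getD i "")).foldl
          (pvBStepCore sB.1 blo i) (List.replicate (bhi - blo) 0,
            sB.2.1, sB.2.2.1, sB.2.2.2) := by
      rw [pvInner]
      apply pvFoldlFilter
      · intro s x hpx
        obtain ⟨new, bi1, bj1, bk1⟩ := s
        dsimp only
        rw [if_pos (beq_iff_eq.mp hpx).symm]
        rfl
      · intro s x hpx
        obtain ⟨new, bi1, bj1, bk1⟩ := s
        dsimp only
        rw [if_neg (by
          intro hq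
          rw [beq_eq_false_iff_ne] at hpx
          exact hpx hq.symm)]
    rw [hbfold]
    -- two folds over the same list, related states
    have := pvFoldRel
      (fun (tA : PySem.Dict Nat Nat × Nat × Nat × Nat) (tB : List Nat × Nat × Nat × Nat) =>
        pvDictRel blo bhi tA.1 tB.1 ∧ tB.1.length = bhi - blo ∧ tA.2 = tB.2)
      (pvAStepCore sA.1 i) (pvBStepCore sB.1 blo i)
      ((List.range' blo (bhi - blo)).filter (fun j => b.getD j "" == a.getD i ""))
      (by
        intro x hx tA tB ⟨r1, r2, r3⟩
        have hxr := List.mem_range'_1.mp (List.mem_of_mem_filter hx)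
        exact pvCore_sim sA.1 sB.1 blo bhi i x hdict (by omega) (by omega) tA tB r1 r2 r3)
      (PySem.Dict.empty, sA.2.1, sA.2.2.1, sA.2.2.2)
      (List.replicate (bhi - blo) 0, sB.2.1, sB.2.2.1, sB.2.2.2)
      (by
        refine ⟨?_, by simp, by rw [hbest]⟩
        intro j'
        split_ifs
        · simp [PySem.Dict.getD_empty]
        · simp [PySem.Dict.getD_empty])
    exact this
  -- Step 2: relate the outer folds
  have houter := pvFoldRel
    (fun (sA : PySem.Dict Nat Nat × Nat × Nat × Nat) (sB : List Nat × Nat × Nat × Nat) =>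
      pvDictRel blo bhi sA.1 sB.1 ∧ sB.1.length = bhi - blo ∧ sA.2 = sB.2)
    (fun st i =>
      let (j2len, besti, bestj, bestsize) := st
      pvFlmInner j2len blo bhi i ((pvB2j b).getD (a.getD i "") [])
        (PySem.Dict.empty, besti, bestj, bestsize))
    (fun (st : List Nat × Nat × Nat × Nat) i =>
      let (run, bi, bj, bk) := st
      pvInner a b blo bhi i run (List.replicate (bhi - blo) 0, bi, bj, bk))
    (List.range' alo (ahi - alo))
    (by
      intro i _ sA sB ⟨r1, r2, r3⟩
      obtain ⟨dA, bA⟩ := sA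
      obtain ⟨dB, bB⟩ := sB
      obtain ⟨biA, bjA, bkA⟩ := bA
      obtain ⟨biB, bjB, bkB⟩ := bB
      exact hrow i (dA, biA, bjA, bkA) (dB, biB, bjB, bkB) r1 r2 r3)
    (PySem.Dict.empty, alo, blo, 0) (List.replicate (bhi - blo) 0, alo, blo, 0)
    (by
      refine ⟨?_, by simp, rfl⟩
      intro j'
      split_ifs
      · simp [PySem.Dict.getD_empty]
      · simp [PySem.Dict.getD_empty])
  obtain ⟨-, -, hbests⟩ := houter
  -- Step 3: the extensions are no-ops
  obtain ⟨run, stok⟩ := pvLongest_sem a b alo ahi blo bhi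
  obtain ⟨-, -, sU, s0, sW⟩ := stok
  simp only at sU s0 sW
  have h0' : (pvLongest a b alo ahi blo bhi).2.2 = 0 →
      (pvLongest a b alo ahi blo bhi).1 = alo ∧ (pvLongest a b alo ahi blo bhi).2.1 = blo := by
    intro hz
    have := s0 hz
    exact ⟨congrArg Prod.fst this, congrArg (fun p => p.2.1) this⟩
  have hW' : (pvLongest a b alo ahi blo bhi).2.2 ≠ 0 →
      alo ≤ (pvLongest a b alo ahi blo bhi).1 ∧ blo ≤ (pvLongest a b alo ahi blo bhi).2.1 ∧
      pvR a b alo blo ((pvLongest a b alo ahi blo bhi).1 + (pvLongest a b alo ahi blo bhi).2.2 - 1)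
        ((pvLongest a b alo ahi blo bhi).2.1 + (pvLongest a b alo ahi blo bhi).2.2 - 1) =
        (pvLongest a b alo ahi blo bhi).2.2 := by
    intro hz
    obtain ⟨w1, w2, -, -, w5⟩ := sW hz
    exact ⟨w1, w2, w5⟩
  have hU' : ∀ i j, alo ≤ i → i < ahi → blo ≤ j → j < bhi →
      pvR a b alo blo i j ≤ (pvLongest a b alo ahi blo bhi).2.2 := by
    intro i j u1 u2 u3 u4
    exact sU i j u1 (by omega) u3 u4
  have hback := pvExtendBack_eq a b alo blo (pvLongest a b alo ahi blo bhi).1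
    (pvLongest a b alo ahi blo bhi).2.1 (pvLongest a b alo ahi blo bhi).2.2
    (fun hz => h0' hz) (fun hz => hW' hz)
  have hfwd := pvExtendFwd_eq a b alo ahi blo bhi (pvLongest a b alo ahi blo bhi).1
    (pvLongest a b alo ahi blo bhi).2.1 (pvLongest a b alo ahi blo bhi).2.2
    hU' (fun hz => h0' hz) (fun hz => hW' hz)
  -- Step 4: assemble
  have hL : pvLongest a b alo ahi blo bhi =
      ((List.range' alo (ahi - alo)).foldl
        (fun (st : List Nat × Nat × Nat × Nat) i =>
          let (run, bi, bj, bk) := st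
          pvInner a b blo bhi i run (List.replicate (bhi - blo) 0, bi, bj, bk))
        (List.replicate (bhi - blo) 0, alo, blo, 0)).2 := rfl
  rw [pvFindLongestMatch]
  rw [show ((List.range' alo (ahi - alo)).foldl
      (fun (st : PySem.Dict Nat Nat × Nat × Nat × Nat) i =>
        let (j2len, besti, bestj, bestsize) := st
        pvFlmInner j2len blo bhi i ((pvB2j b).getD (a.getD i "") [])
          (PySem.Dict.empty, besti, bestj, bestsize))
      (PySem.Dict.empty, alo, blo, 0)).2 = pvLongest a b alo ahi blo bhi from by
    rw [hL]; exact hbests]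
  rw [hback]
  dsimp only
  rw [hfwd]

-- ---------- the stack loop produces the recursion's blocks (as a multiset) ----------

-- weight of the pending-region queue: strictly decreases at every pop
def pvMu (q : List (Nat × Nat × Nat × Nat)) : Nat :=
  (q.map (fun r => 2 * (r.2.1 - r.1) + 1)).sum

lemma pvLongest_empty (a b : List String) (alo ahi blo bhi : Nat)
    (h : ahi ≤ alo ∨ bhi ≤ blo) : (pvLongest a b alo ahi blo bhi).2.2 = 0 := by
  by_contra hz
  have := pvLongest_facts a b alo ahi blo bhi hz
  omega

lemma pvBlocks_nil (a b : List String) (fuel alo ahi blo bhi : Nat)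
    (h : ahi ≤ alo ∨ bhi ≤ blo) : pvBlocks a b fuel alo ahi blo bhi = [] := by
  cases fuel with
  | zero => rfl
  | succ n => simp [pvBlocks, pvLongest_empty a b alo ahi blo bhi h]

lemma pvBlocks_fuel (a b : List String) (f1 : Nat) :
    ∀ (f2 alo ahi blo bhi : Nat), ahi - alo < f1 → ahi - alo < f2 →
    pvBlocks a b f1 alo ahi blo bhi = pvBlocks a b f2 alo ahi blo bhi := by
  induction f1 with
  | zero => intro f2 alo ahi blo bhi h1 _; omega
  | succ n ih =>
    intro f2 alo ahi blo bhi h1 h2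
    cases f2 with
    | zero => omega
    | succ m =>
      simp only [pvBlocks]
      by_cases hz : (pvLongest a b alo ahi blo bhi).2.2 = 0
      · rw [if_pos hz, if_pos hz]
      · rw [if_neg hz, if_neg hz]
        have hf := pvLongest_facts a b alo ahi blo bhi hz
        rw [ih m alo (pvLongest a b alo ahi blo bhi).1 blo (pvLongest a b alo ahi blo bhi).2.1
            (by omega) (by omega),
          ih m ((pvLongest a b alo ahi blo bhi).1 + (pvLongest a b alo ahi blo bhi).2.2) ahi
            ((pvLongest a b alo ahi blo bhi).2.1 + (pvLongest a b alo ahi blo bhi).2.2) bhi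
            (by omega) (by omega)]

lemma pvMbLoop_perm (a b : List String) :
    ∀ (fuel : Nat) (q : List (Nat × Nat × Nat × Nat)) (acc : List PvBlock),
      pvMu q < fuel →
      (∀ r ∈ q, r.1 ≤ r.2.1 ∧ r.2.1 ≤ a.length ∧ r.2.2.1 ≤ r.2.2.2 ∧ r.2.2.2 ≤ b.length) →
      ((pvMbLoop a b (pvB2j b) fuel q acc : List PvBlock) : Multiset PvBlock) =
        (acc : Multiset PvBlock) +
          ((q.map (fun r => pvBlocks a b (r.2.1 - r.1 + 1) r.1 r.2.1 r.2.2.1 r.2.2.2)).flatten :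
            Multiset PvBlock) := by
  intro fuel
  induction fuel with
  | zero => intro q acc hmu _; exact absurd hmu (by omega)
  | succ n ih =>
    intro q acc hmu hinv
    cases q with
    | nil => simp [pvMbLoop]
    | cons r rest =>
      obtain ⟨alo, ahi, blo, bhi⟩ := r
      have hri := hinv (alo, ahi, blo, bhi) (List.mem_cons_self ..)
      simp only at hri
      have hmu' : pvMu ((alo, ahi, blo, bhi) :: rest) = 2 * (ahi - alo) + 1 + pvMu rest := by
        simp [pvMu]
      simp only [pvMbLoop]
      rw [pvFindLongest_eq a b alo ahi blo bhi (by omega) (by omega)]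
      rcases hp : pvLongest a b alo ahi blo bhi with ⟨Li, Lj, Lk⟩
      dsimp only
      have hrest : ∀ r' ∈ rest, r'.1 ≤ r'.2.1 ∧ r'.2.1 ≤ a.length ∧ r'.2.2.1 ≤ r'.2.2.2 ∧
          r'.2.2.2 ≤ b.length := fun r' hr' => hinv r' (List.mem_cons_of_mem _ hr')
      by_cases hk : Lk ≠ 0
      · rw [if_pos hk]
        have hLf := pvLongest_facts a b alo ahi blo bhi (by rw [hp]; exact hk)
        rw [hp] at hLf
        simp only at hLf
        -- the head region's blocks, in recursion form
        have hhead : pvBlocks a b (ahi - alo + 1) alo ahi blo bhi =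
            pvBlocks a b (Li - alo + 1) alo Li blo Lj ++ [(Li, Lj, Lk)] ++
              pvBlocks a b (ahi - (Li + Lk) + 1) (Li + Lk) ahi (Lj + Lk) bhi := by
          conv_lhs => rw [pvBlocks]
          rw [hp]
          dsimp only
          rw [if_neg hk,
            pvBlocks_fuel a b (ahi - alo) (Li - alo + 1) alo Li blo Lj (by omega) (by omega),
            pvBlocks_fuel a b (ahi - alo) (ahi - (Li + Lk) + 1) (Li + Lk) ahi (Lj + Lk) bhi
              (by omega) (by omega)]
        by_cases hg1 : alo < Li ∧ blo < Lj
        · rw [if_pos hg1]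
          by_cases hg2 : Li + Lk < ahi ∧ Lj + Lk < bhi
          · rw [if_pos hg2]
            rw [ih ((Li + Lk, ahi, Lj + Lk, bhi) :: (alo, Li, blo, Lj) :: rest)
              (acc ++ [(Li, Lj, Lk)])
              (by simp only [pvMu, List.map_cons, List.sum_cons] at hmu ⊢; omega)
              (by
                intro r' hr'
                rcases List.mem_cons.mp hr' with h1 | h1
                · subst h1; simp only; omega
                rcases List.mem_cons.mp h1 with h2 | h2
                · subst h2; simp only; omega
                · exact hrest r' h2)]
            refine Multiset.ext.mpr fun x => ?_
            simp [hhead, List.count_append, List.count_cons]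
            ring
          · rw [if_neg hg2]
            have hre : pvBlocks a b (ahi - (Li + Lk) + 1) (Li + Lk) ahi (Lj + Lk) bhi = [] :=
              pvBlocks_nil a b _ _ _ _ _ (by omega)
            rw [ih ((alo, Li, blo, Lj) :: rest) (acc ++ [(Li, Lj, Lk)])
              (by simp only [pvMu, List.map_cons, List.sum_cons] at hmu ⊢; omega)
              (by
                intro r' hr'
                rcases List.mem_cons.mp hr' with h1 | h1
                · subst h1; simp only; omega
                · exact hrest r' h1)]
            refine Multiset.ext.mpr fun x => ?_
            simp [hhead, hre, List.count_append, List.count_cons]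
            ring
        · rw [if_neg hg1]
          have hle : pvBlocks a b (Li - alo + 1) alo Li blo Lj = [] :=
            pvBlocks_nil a b _ _ _ _ _ (by omega)
          by_cases hg2 : Li + Lk < ahi ∧ Lj + Lk < bhi
          · rw [if_pos hg2]
            rw [ih ((Li + Lk, ahi, Lj + Lk, bhi) :: rest) (acc ++ [(Li, Lj, Lk)])
              (by simp only [pvMu, List.map_cons, List.sum_cons] at hmu ⊢; omega)
              (by
                intro r' hr'
                rcases List.mem_cons.mp hr' with h1 | h1
                · subst h1; simp only; omega
                · exact hrest r' h1)]
            refine Multiset.ext.mpr fun x => ?_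
            simp [hhead, hle, List.count_append, List.count_cons]
          · rw [if_neg hg2]
            have hre : pvBlocks a b (ahi - (Li + Lk) + 1) (Li + Lk) ahi (Lj + Lk) bhi = [] :=
              pvBlocks_nil a b _ _ _ _ _ (by omega)
            rw [ih rest (acc ++ [(Li, Lj, Lk)])
              (by simp only [pvMu, List.map_cons, List.sum_cons] at hmu ⊢; omega) hrest]
            refine Multiset.ext.mpr fun x => ?_
            simp [hhead, hle, hre, List.count_append, List.count_cons]
      · rw [if_neg hk]
        rw [ih rest acc (by omega) hrest]
        have hhead : pvBlocks a b (ahi - alo + 1) alo ahi blo bhi = [] := by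
          simp only [pvBlocks, hp]
          rw [if_pos (by omega)]
        simp [hhead]

-- ---------- shape of the recursion's block list ----------

lemma pvBlocks_wf (a b : List String) :
    ∀ (fuel alo ahi blo bhi : Nat), ∀ blk ∈ pvBlocks a b fuel alo ahi blo bhi,
      alo ≤ blk.1 ∧ blk.1 + blk.2.2 ≤ ahi ∧ blo ≤ blk.2.1 ∧ blk.2.1 + blk.2.2 ≤ bhi ∧
        1 ≤ blk.2.2 := by
  intro fuel
  induction fuel with
  | zero => intro alo ahi blo bhi blk hm; simp [pvBlocks] at hm
  | succ n ih =>
    intro alo ahi blo bhi blk hm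
    simp only [pvBlocks] at hm
    by_cases hz : (pvLongest a b alo ahi blo bhi).2.2 = 0
    · rw [if_pos hz] at hm; simp at hm
    · rw [if_neg hz] at hm
      have hf := pvLongest_facts a b alo ahi blo bhi hz
      rcases List.mem_append.mp hm with hm1 | hm2
      · rcases List.mem_append.mp hm1 with hl | hc
        · have := ih alo (pvLongest a b alo ahi blo bhi).1 blo
            (pvLongest a b alo ahi blo bhi).2.1 blk hl
          omega
        · have : blk = pvLongest a b alo ahi blo bhi := by simpa using hc
          subst this
          omega
      · have := ih ((pvLongest a b alo ahi blo bhi).1 + (pvLongest a b alo ahi blo bhi).2.2) ahi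
          ((pvLongest a b alo ahi blo bhi).2.1 + (pvLongest a b alo ahi blo bhi).2.2) bhi blk hm2
        omega

lemma pvBlocks_pairwise (a b : List String) :
    ∀ (fuel alo ahi blo bhi : Nat),
      (pvBlocks a b fuel alo ahi blo bhi).Pairwise
        (fun x y => x.1 + x.2.2 ≤ y.1 ∧ x.2.1 + x.2.2 ≤ y.2.1) := by
  intro fuel
  induction fuel with
  | zero => intro alo ahi blo bhi; simp [pvBlocks]
  | succ n ih =>
    intro alo ahi blo bhi
    simp only [pvBlocks]
    by_cases hz : (pvLongest a b alo ahi blo bhi).2.2 = 0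
    · rw [if_pos hz]; exact List.Pairwise.nil
    · rw [if_neg hz]
      have hf := pvLongest_facts a b alo ahi blo bhi hz
      rw [List.append_assoc, List.pairwise_append]
      refine ⟨ih _ _ _ _, ?_, ?_⟩
      · rw [List.singleton_append, List.pairwise_cons]
        refine ⟨?_, ih _ _ _ _⟩
        intro y hy
        have := pvBlocks_wf a b n
          ((pvLongest a b alo ahi blo bhi).1 + (pvLongest a b alo ahi blo bhi).2.2) ahi
          ((pvLongest a b alo ahi blo bhi).2.1 + (pvLongest a b alo ahi blo bhi).2.2) bhi y hy
        omega
      · intro x hx y hy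
        have hxw := pvBlocks_wf a b n alo (pvLongest a b alo ahi blo bhi).1 blo
          (pvLongest a b alo ahi blo bhi).2.1 x hx
        rcases List.mem_cons.mp hy with hc | hr
        · subst hc; omega
        · have hyw := pvBlocks_wf a b n
            ((pvLongest a b alo ahi blo bhi).1 + (pvLongest a b alo ahi blo bhi).2.2) ahi
            ((pvLongest a b alo ahi blo bhi).2.1 + (pvLongest a b alo ahi blo bhi).2.2) bhi y hr
          omega

-- a permutation of a strictly .1-increasing list that is itself ordered is that list
lemma pvSortedUnique : ∀ (l1 l2 : List PvBlock), l1.Perm l2 →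
    l1.Pairwise (fun x y => x.1 < y.1) → l2.Pairwise (fun x y => x.1 < y.1) → l1 = l2 := by
  intro l1
  induction l1 with
  | nil =>
    intro l2 hperm _ _
    exact (List.Perm.nil_eq hperm).symm ▸ rfl
  | cons x t1 ih =>
    intro l2 hperm hp1 hp2
    cases l2 with
    | nil => exact absurd hperm.symm.nil_eq (by simp)
    | cons y t2 =>
      have hxy : x = y := by
        by_contra hne
        have hx2 : x ∈ y :: t2 := hperm.mem_iff.mp (List.mem_cons_self ..)
        have hy1 : y ∈ x :: t1 := hperm.symm.mem_iff.mp (List.mem_cons_self ..)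
        have hx2' : x ∈ t2 := by
          rcases List.mem_cons.mp hx2 with h | h
          · exact absurd h hne
          · exact h
        have hy1' : y ∈ t1 := by
          rcases List.mem_cons.mp hy1 with h | h
          · exact absurd h.symm hne
          · exact h
        have h1 := (List.pairwise_cons.mp hp1).1 y hy1'
        have h2 := (List.pairwise_cons.mp hp2).1 x hx2'
        omega
      subst hxy
      have := ih t2 (hperm.cons_inv) (List.pairwise_cons.mp hp1).2 (List.pairwise_cons.mp hp2).2
      rw [this]

-- ---------- A's opcode fold = block fold with array assignment ----------

-- set-style block step (proof layer): what A's opcode loop does per matching block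
def pvBStep (original : List String) (st : List Int × Nat × Nat) (blk : PvBlock) :
    List Int × Nat × Nat :=
  let (off, pi, pj) := st
  let (i, j, size) := blk
  let gap : Int := if original ≠ [] then min ((pi : Int) + 1) (original.length : Int) else 1
  (pvFillEq (pvFillConst off pj (j - pj) gap) j i size, i + size, j + size)

lemma pvFillConst_zero (off : List Int) (s : Nat) (v : Int) : pvFillConst off s 0 v = off := by
  simp [pvFillConst]

lemma pvFillEq_zero (off : List Int) (j1 i1 : Nat) : pvFillEq off j1 i1 0 = off := by
  simp [pvFillEq]

-- the dead `if fallback <= 0` guard of A: the fallback is always ≥ 1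
lemma pv_fallback_guard (original : List String) (i1 : Nat) :
    (if (if original = [] then (1 : Int) else min ((i1 : Int) + 1) (original.length : Int)) ≤ 0
       then (1 : Int)
       else if original = [] then 1 else min ((i1 : Int) + 1) (original.length : Int)) =
      (if original = [] then 1 else min ((i1 : Int) + 1) (original.length : Int)) := by
  by_cases h : original = []
  · simp [h]
  · have h1 : 1 ≤ (original.length : Int) := by
      have := List.length_pos_iff.mpr h; omega
    simp [h]

-- A's opcode fold equals the set-style block fold, for ANY block list and any start state
lemma pv_fold_eq (original : List String) (blocks : List PvBlock) :
    ∀ (i j : Nat) (off : List Int),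
      (pvOpcodesOf blocks i j).foldl (pvAStep original) off =
        (blocks.foldl (pvBStep original) (off, i, j)).1 := by
  induction blocks with
  | nil => intro i j off; simp [pvOpcodesOf]
  | cons blk rest ih =>
    obtain ⟨ai, bj, sz⟩ := blk
    intro i j off
    rw [pvOpcodesOf, List.foldl_append, List.foldl_append, ih, List.foldl_cons]
    have hstep : pvBStep original (off, i, j) (ai, bj, sz) =
        (pvFillEq (pvFillConst off j (bj - j)
          (if original ≠ [] then min ((i : Int) + 1) (original.length : Int) else 1)) bj ai sz,
          ai + sz, bj + sz) := by
      simp [pvBStep]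
    rw [hstep]
    congr 1
    have heq : ∀ o : List Int,
        ((if sz ≠ 0 then [("equal", ai, ai + sz, bj, bj + sz)] else []).foldl
          (pvAStep original) o) = pvFillEq o bj ai sz := by
      intro o
      by_cases hsz : sz = 0
      · simp [hsz, pvFillEq_zero]
      · simp [hsz, pvAStep]
    have hgap :
        ((if i < ai ∧ j < bj then [("replace", i, ai, j, bj)]
          else if i < ai then [("delete", i, ai, j, bj)]
          else if j < bj then [("insert", i, ai, j, bj)]
          else []).foldl (pvAStep original) off) =
          pvFillConst off j (bj - j)
            (if original ≠ [] then min ((i : Int) + 1) (original.length : Int) else 1) := by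
      by_cases hi : i < ai <;> by_cases hj : j < bj
      · simp [hi, hj, pvAStep, pv_fallback_guard]
      · have hz : bj - j = 0 := by omega
        simp [hi, hj, pvAStep, hz, pvFillConst_zero]
      · simp [hi, hj, pvAStep, pv_fallback_guard]
      · have hz : bj - j = 0 := by omega
        simp [hi, hj, hz, pvFillConst_zero]
    rw [hgap, heq]

-- ---------- merging adjacent blocks does not change the fold ----------

lemma pvFillEq_split (off : List Int) (j1 i1 k1 k2 : Nat) :
    pvFillEq off j1 i1 (k1 + k2) =
      pvFillEq (pvFillEq off j1 i1 k1) (j1 + k1) (i1 + k1) k2 := by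
  simp only [pvFillEq]
  rw [List.range_add, List.foldl_append, List.foldl_map]
  congr 1
  funext o t
  rw [show j1 + (k1 + t) = j1 + k1 + t by omega]
  congr 1
  push_cast
  ring

lemma pvMergeAdj_fold (original : List String) :
    ∀ (l : List PvBlock) (i1 j1 k1 : Nat) (s : List PvBlock) (st : List Int × Nat × Nat),
      k1 ≠ 0 → (∀ blk ∈ l, blk.2.2 ≠ 0) →
      ((pvMergeAdj l i1 j1 k1 ++ s).foldl (pvBStep original) st) =
        (((i1, j1, k1) :: l ++ s).foldl (pvBStep original) st) := by
  intro l
  induction l with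
  | nil =>
    intro i1 j1 k1 s st hk1 _
    rw [pvMergeAdj, if_pos hk1]
  | cons blk rest ih =>
    intro i1 j1 k1 s st hk1 hall
    obtain ⟨i2, j2, k2⟩ := blk
    have hk2 : k2 ≠ 0 := hall (i2, j2, k2) (List.mem_cons_self ..)
    have hrest : ∀ blk ∈ rest, blk.2.2 ≠ 0 := fun blk hb => hall blk (List.mem_cons_of_mem _ hb)
    rw [pvMergeAdj]
    by_cases hadj : i1 + k1 = i2 ∧ j1 + k1 = j2
    · rw [if_pos hadj, ih i1 j1 (k1 + k2) s st (by omega) hrest]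
      simp only [List.cons_append, List.foldl_cons]
      congr 1
      obtain ⟨off, pi, pj⟩ := st
      simp only [pvBStep]
      obtain ⟨ha1, ha2⟩ := hadj
      subst ha1; subst ha2
      rw [show j1 + k1 - (j1 + k1) = 0 by omega, pvFillConst_zero, pvFillEq_split]
      simp only [Prod.mk.injEq]
      exact ⟨trivial, by omega, by omega⟩
    · rw [if_neg hadj, if_pos hk1]
      simp only [List.cons_append, List.foldl_cons]
      exact ih i2 j2 k2 s _ hk2 hrest

-- ---------- array assignment vs appending ----------

-- blocks fit, in order, between pj and m
def pvChain (m : Nat) : Nat → List PvBlock → Prop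
  | _, [] => True
  | pj, blk :: r => pj ≤ blk.2.1 ∧ blk.2.1 + blk.2.2 ≤ m ∧ pvChain m (blk.2.1 + blk.2.2) r

-- writing at the boundary between a prefix and a replicate tail
lemma pvSetBoundary (xs : List Int) (m : Nat) (z v : Int) (hm : 1 ≤ m) :
    (xs ++ List.replicate m z).set xs.length v = xs ++ [v] ++ List.replicate (m - 1) z := by
  induction xs with
  | nil =>
    simp only [List.nil_append]
    rw [show m = (m - 1) + 1 by omega, List.replicate_succ]
    simp
  | cons x xs ih =>
    simp only [List.cons_append, List.length_cons, List.set_cons_succ, ih]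

lemma pvFillConst_app (out : List Int) (r n : Nat) (z v : Int) (h : n ≤ r) :
    pvFillConst (out ++ List.replicate r z) out.length n v =
      out ++ List.replicate n v ++ List.replicate (r - n) z := by
  induction n with
  | zero => simp [pvFillConst]
  | succ n ih =>
    have hstep : pvFillConst (out ++ List.replicate r z) out.length (n + 1) v =
        (pvFillConst (out ++ List.replicate r z) out.length n v).set (out.length + n) v := by
      simp only [pvFillConst, List.range_succ, List.foldl_append, List.foldl_cons, List.foldl_nil]
    rw [hstep, ih (by omega)]
    rw [show out ++ List.replicate n v ++ List.replicate (r - n) z =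
      (out ++ List.replicate n v) ++ List.replicate (r - n) z from by simp,
      show out.length + n = (out ++ List.replicate n v).length from by simp,
      pvSetBoundary _ _ _ _ (by omega)]
    rw [show List.replicate (n + 1) v = List.replicate n v ++ [v] from List.replicate_succ' ..]
    simp only [List.append_assoc]
    rw [show r - n - 1 = r - (n + 1) by omega]

lemma pvFillEq_app (out : List Int) (r n i1 : Nat) (z : Int) (h : n ≤ r) :
    pvFillEq (out ++ List.replicate r z) out.length i1 n =
      out ++ (List.range n).map (fun t : Nat => (i1 : Int) + t + 1) ++ List.replicate (r - n) z := by
  induction n with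
  | zero => simp [pvFillEq]
  | succ n ih =>
    have hstep : pvFillEq (out ++ List.replicate r z) out.length i1 (n + 1) =
        (pvFillEq (out ++ List.replicate r z) out.length i1 n).set (out.length + n)
          ((i1 : Int) + n + 1) := by
      simp only [pvFillEq, List.range_succ, List.foldl_append, List.foldl_cons, List.foldl_nil]
    rw [hstep, ih (by omega)]
    rw [show out ++ (List.range n).map (fun t : Nat => (i1 : Int) + t + 1) ++ List.replicate (r - n) z =
      (out ++ (List.range n).map (fun t : Nat => (i1 : Int) + t + 1)) ++ List.replicate (r - n) z from
        by simp,
      show out.length + n = (out ++ (List.range n).map (fun t : Nat => (i1 : Int) + t + 1)).length from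
        by simp,
      pvSetBoundary _ _ _ _ (by omega)]
    rw [List.range_succ, List.map_append]
    simp only [List.map_cons, List.map_nil, List.append_assoc]
    rw [show r - n - 1 = r - (n + 1) by omega]

lemma pvSetApp (original : List String) (m : Nat) :
    ∀ (bl : List PvBlock) (out : List Int) (pi : Nat), pvChain m out.length bl →
      bl.foldl (pvBStep original) (out ++ List.replicate (m - out.length) (0 : Int), pi, out.length) =
        (((bl.foldl (pvBStepApp original) (out, pi)).1
            ++ List.replicate (m - (bl.foldl (pvBStepApp original) (out, pi)).1.length) (0 : Int)),
          (bl.foldl (pvBStepApp original) (out, pi)).2,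
          (bl.foldl (pvBStepApp original) (out, pi)).1.length) := by
  intro bl
  induction bl with
  | nil => intro out pi _; rfl
  | cons blk r ih =>
    intro out pi hchain
    obtain ⟨i, j, k⟩ := blk
    simp only [pvChain] at hchain
    obtain ⟨hc1, hc2, hc3⟩ := hchain
    simp only [List.foldl_cons]
    set gap : Int := if original ≠ [] then min ((pi : Int) + 1) (original.length : Int)
      else 1 with hgapdef
    set out2 : List Int :=
      out ++ List.replicate (j - out.length) gap ++
        (List.range k).map (fun t : Nat => (i : Int) + t + 1) with hout2
    have hlen2 : out2.length = j + k := by simp [hout2]; omega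
    have hstep : pvBStep original (out ++ List.replicate (m - out.length) 0, pi, out.length)
        (i, j, k) = (out2 ++ List.replicate (m - (j + k)) 0, i + k, j + k) := by
      simp only [pvBStep]
      rw [pvFillConst_app out (m - out.length) (j - out.length) 0 gap (by omega),
        show m - out.length - (j - out.length) = m - j by omega,
        show out ++ List.replicate (j - out.length) gap ++ List.replicate (m - j) 0 =
          (out ++ List.replicate (j - out.length) gap) ++ List.replicate (m - j) 0 from by
            simp [List.append_assoc]]
      have hfe := pvFillEq_app (out ++ List.replicate (j - out.length) gap) (m - j) k i 0
        (by omega)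
      rw [show (out ++ List.replicate (j - out.length) gap).length = j from by simp; omega]
        at hfe
      rw [hfe, show m - j - k = m - (j + k) by omega, hout2]
    rw [hstep]
    have happ : pvBStepApp original (out, pi) (i, j, k) = (out2, i + k) := by
      simp only [pvBStepApp, hout2, hgapdef, List.append_assoc]
    rw [happ, show (out2 ++ List.replicate (m - (j + k)) 0, i + k, j + k) =
      (out2 ++ List.replicate (m - out2.length) 0, i + k, out2.length) from by rw [hlen2]]
    exact ih out2 (i + k) (by rw [hlen2]; exact hc3)

lemma pvChain_mono (m : Nat) : ∀ (l : List PvBlock) (p q : Nat), p ≤ q →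
    pvChain m q l → pvChain m p l := by
  intro l p q hpq hc
  cases l with
  | nil => trivial
  | cons blk r =>
    simp only [pvChain] at hc ⊢
    exact ⟨by omega, hc.2.1, hc.2.2⟩

lemma pvBlocks_chain (a b : List String) (m : Nat) :
    ∀ (fuel alo ahi blo bhi : Nat) (rest : List PvBlock), blo ≤ bhi → bhi ≤ m →
      pvChain m bhi rest →
      pvChain m blo (pvBlocks a b fuel alo ahi blo bhi ++ rest) := by
  intro fuel
  induction fuel with
  | zero =>
    intro alo ahi blo bhi rest hlo hm hrest
    exact pvChain_mono m rest blo bhi hlo hrest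
  | succ n ih =>
    intro alo ahi blo bhi rest hlo hm hrest
    by_cases hz : (pvLongest a b alo ahi blo bhi).2.2 = 0
    · have hnil : pvBlocks a b (n + 1) alo ahi blo bhi = [] := by
        conv_lhs => rw [pvBlocks]
        rw [if_pos hz]
      rw [hnil, List.nil_append]
      exact pvChain_mono m rest blo bhi hlo hrest
    · have hLf := pvLongest_facts a b alo ahi blo bhi hz
      have hblocks : pvBlocks a b (n + 1) alo ahi blo bhi =
          pvBlocks a b n alo (pvLongest a b alo ahi blo bhi).1 blo
            (pvLongest a b alo ahi blo bhi).2.1 ++ [pvLongest a b alo ahi blo bhi] ++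
          pvBlocks a b n
            ((pvLongest a b alo ahi blo bhi).1 + (pvLongest a b alo ahi blo bhi).2.2) ahi
            ((pvLongest a b alo ahi blo bhi).2.1 + (pvLongest a b alo ahi blo bhi).2.2) bhi := by
        conv_lhs => rw [pvBlocks]
        rw [if_neg hz]
      rw [hblocks]
      rw [List.append_assoc, List.append_assoc, List.singleton_append]
      refine ih alo (pvLongest a b alo ahi blo bhi).1 blo (pvLongest a b alo ahi blo bhi).2.1 _
        (by omega) (by omega) ?_
      simp only [pvChain]
      refine ⟨le_refl _, ?_, ?_⟩
      · show (pvLongest a b alo ahi blo bhi).2.1 + (pvLongest a b alo ahi blo bhi).2.2 ≤ m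
        omega
      · exact ih _ ahi _ bhi rest (by omega) hm hrest

-- assembling: the whole pipeline of A equals the pipeline of B
lemma pv_main (a p : List String) :
    (pvOpcodesOf (pvGetMatchingBlocks a p) 0 0).foldl (pvAStep a)
        (List.replicate p.length 0) =
      ((pvBlocks a p (a.length + 1) 0 a.length 0 p.length
          ++ [(a.length, p.length, 0)]).foldl (pvBStepApp a) ([], 0)).1 := by
  rw [pv_fold_eq]
  set recL := pvBlocks a p (a.length + 1) 0 a.length 0 p.length with hrecL
  set raw := pvMbLoop a p (pvB2j p) (2 * a.length + 2) [(0, a.length, 0, p.length)] []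
    with hraw
  -- the stack loop's result is a permutation of the recursion's blocks
  have hperm : raw.Perm recL := by
    rw [← Multiset.coe_eq_coe, hraw,
      pvMbLoop_perm a p (2 * a.length + 2) [(0, a.length, 0, p.length)] []
        (by simp [pvMu]) (by intro r hr; simp at hr; subst hr; simp)]
    simp [hrecL]
  -- the recursion's list is strictly increasing in the first coordinate
  have hpairR : recL.Pairwise (fun x y : PvBlock => x.1 < y.1) := by
    refine (pvBlocks_pairwise a p (a.length + 1) 0 a.length 0 p.length).imp_of_mem ?_
    intro x y hx _ hr
    have := pvBlocks_wf a p (a.length + 1) 0 a.length 0 p.length x hx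
    omega
  have hall : ∀ blk ∈ recL, blk.2.2 ≠ 0 := by
    intro blk hb
    have := pvBlocks_wf a p (a.length + 1) 0 a.length 0 p.length blk hb
    omega
  -- sorting the raw blocks gives exactly the recursion's list
  have hperm2 : (raw.mergeSort (fun x y => pvBlockLE x y)).Perm recL :=
    (List.mergeSort_perm raw _).trans hperm
  have hsorted : (raw.mergeSort (fun x y => pvBlockLE x y)).Pairwise
      (fun x y => pvBlockLE x y = true) :=
    List.pairwise_mergeSort
      (by intro x y z h1 h2; simp [pvBlockLE] at h1 h2 ⊢; omega)
      (by intro x y; simp [pvBlockLE]; omega) raw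
  have hne : (raw.mergeSort (fun x y => pvBlockLE x y)).Pairwise
      (fun x y : PvBlock => x.1 ≠ y.1) := by
    refine (List.Perm.pairwise_iff (fun h => h.symm) hperm2).mpr ?_
    exact hpairR.imp (fun h => by omega)
  have hstrict : (raw.mergeSort (fun x y => pvBlockLE x y)).Pairwise
      (fun x y : PvBlock => x.1 < y.1) := by
    refine (hsorted.and hne).imp ?_
    intro x y ⟨h1, h2⟩
    simp [pvBlockLE] at h1
    omega
  have hsort : raw.mergeSort (fun x y => pvBlockLE x y) = recL :=
    pvSortedUnique _ _ hperm2 hstrict hpairR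
  rw [pvGetMatchingBlocks, ← hraw, hsort]
  -- dropping the adjacent-block merge does not change the fold
  have hmerge : ((pvMergeAdj recL 0 0 0 ++ [(a.length, p.length, 0)]).foldl (pvBStep a)
      (List.replicate p.length (0 : Int), 0, 0)) =
      ((recL ++ [(a.length, p.length, 0)]).foldl (pvBStep a)
        (List.replicate p.length (0 : Int), 0, 0)) := by
    cases hL : recL with
    | nil => rw [show pvMergeAdj [] 0 0 0 = [] from by simp [pvMergeAdj]]
    | cons x r =>
      obtain ⟨i2, j2, k2⟩ := x
      have hx0 : pvMergeAdj ((i2, j2, k2) :: r) 0 0 0 = pvMergeAdj r i2 j2 k2 := by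
        rw [pvMergeAdj]
        by_cases hc : 0 + 0 = i2 ∧ 0 + 0 = j2
        · rw [if_pos hc]
          obtain ⟨e1, e2⟩ := hc
          simp at e1 e2
          subst e1; subst e2
          simp
        · rw [if_neg hc]
          simp
      rw [hx0]
      have hk2 : k2 ≠ 0 := hall (i2, j2, k2) (by rw [hL]; exact List.mem_cons_self ..)
      have hr : ∀ blk ∈ r, blk.2.2 ≠ 0 := by
        intro blk hb
        exact hall blk (by rw [hL]; exact List.mem_cons_of_mem _ hb)
      exact pvMergeAdj_fold a r i2 j2 k2 [(a.length, p.length, 0)]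
        (List.replicate p.length (0 : Int), 0, 0) hk2 hr
  rw [hmerge]
  -- array assignment equals appending
  have hchain : pvChain p.length ([] : List Int).length (recL ++ [(a.length, p.length, 0)]) := by
    have := pvBlocks_chain a p p.length (a.length + 1) 0 a.length 0 p.length
      [(a.length, p.length, 0)] (by omega) (le_refl _) (by simp [pvChain])
    simpa using this
  have hsa := pvSetApp a p.length (recL ++ [(a.length, p.length, 0)]) [] 0 hchain
  simp only [List.nil_append, List.length_nil, Nat.sub_zero] at hsa
  rw [hsa]
  -- the sentinel block pads the appended list to full length
  have hflen : p.length ≤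
      ((recL ++ [(a.length, p.length, 0)]).foldl (pvBStepApp a) ([], 0)).1.length := by
    rw [List.foldl_append, List.foldl_cons, List.foldl_nil]
    set st := recL.foldl (pvBStepApp a) (([] : List Int), 0) with hst
    obtain ⟨out, pi⟩ := st
    simp [pvBStepApp]
    omega
  rw [List.foldl_append, List.foldl_cons, List.foldl_nil] at hflen
  simp [Nat.sub_eq_zero_of_le hflen]

-- ===== VERDICT (by name: the statement is the Claim_ definition above) =====
theorem compute_line_offsets_py_spec : Claim_equal_compute_line_offsets_py := by
  intro original processed _
  unfold Spec_compute_line_offsets_py compute_line_offsets_py compute_line_offsets_py_alt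
  by_cases hp : processed = []
  · simp [hp]
  · rw [if_neg hp, if_neg hp]
    exact pv_main original processed
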